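-- pv_equiv track=rewrite | github.com/YertayGreatest/Web-Dev | webDev_lab 7/wd_lab_7_first_task/CodingBat/warmUp-2.py | last2
-- ===== SOURCE A (Python) =====
-- def last2(str):
--   if len(str)<2:
--     return 0
--   pat = str[-2:]
--   cnt=0
--   for i in range(len(str)):
--     if str[i:i+2] == pat:
--       cnt+=1
--   return cnt-1
-- ===== SOURCE B (Python) =====
-- def last2(str):
--   if len(str) < 2:
--     return 0
--   pat = str[-2:]
--   cnt = 0
--   start = 0
--   while True:
--     idx = str.find(pat, start)
--     if idx == -1:
--       break
--     cnt += 1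
--     start = idx + 1
--   return cnt - 1
-- ===== Notes on version B (the rewrite author's own statement) =====
-- stated objective: alternative
-- what changed: Replaced the per-index window comparison (slice str[i:i+2] == pat at every i) with a find-driven scan that jumps from one match to the next via str.find(pat, start), advancing start past each hit while still counting overlaps.
import Mathlib
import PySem

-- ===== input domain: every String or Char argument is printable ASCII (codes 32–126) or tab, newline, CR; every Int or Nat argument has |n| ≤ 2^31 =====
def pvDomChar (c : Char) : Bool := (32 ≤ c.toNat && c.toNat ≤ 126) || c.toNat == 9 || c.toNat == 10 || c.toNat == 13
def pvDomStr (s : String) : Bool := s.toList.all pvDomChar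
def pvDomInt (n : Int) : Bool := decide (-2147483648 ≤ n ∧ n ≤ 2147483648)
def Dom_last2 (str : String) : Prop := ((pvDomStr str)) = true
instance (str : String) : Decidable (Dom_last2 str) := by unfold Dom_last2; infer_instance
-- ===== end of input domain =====

-- B changes the scan: a find-driven loop jumping between matches instead of testing every window; same cost class.

-- ===== PORT A =====
def last2 (str : String) : Int :=
  if PySem.Str.len str < 2 then 0
  else
    let pat := PySem.Str.slice str (some (-2)) none
    let cnt : Int :=
      (PySem.List.pyRange 0 (PySem.Str.len str) 1).foldl
        (fun cnt i =>
          if PySem.Str.slice str (some i) (some (i + 2)) = pat then cnt + 1 else cnt) 0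
    cnt - 1

-- ===== PORT B =====
-- termination helper for the while-loop: a successful find is at index ≥ start (so start ≤ s.length)
theorem pvFindFrom_ge (s sub : List Char) (k : Nat)
    (h : PySem.Chars.findFrom s sub (k : Int) ≠ -1) :
    k ≤ s.length ∧ (k : Int) ≤ PySem.Chars.findFrom s sub (k : Int) := by
  by_cases hk : k ≤ s.length
  · refine ⟨hk, ?_⟩
    exact (PySem.Chars.findFrom_natCast_spec s sub k hk h).1
  · exfalso
    apply h
    unfold PySem.Chars.findFrom
    simp only
    have h1 : ¬ ((k : Int) < 0) := by omega
    have h2 : ((s.length : Int) < (k : Int)) := by exact_mod_cast Nat.lt_of_not_le hk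
    simp [h1]
    omega

-- the while-True loop of Source B: idx = str.find(pat, start); stop on -1, else count and restart at idx+1
def last2FindLoop (s pat : String) (start : Nat) (cnt : Int) : Int :=
  let idx := PySem.Str.findFrom s pat (start : Int) none
  if h : idx = -1 then cnt
  else last2FindLoop s pat (idx.toNat + 1) (cnt + 1)
termination_by s.toList.length + 1 - start
decreasing_by
  simp only [PySem.Str.findFrom_eq] at h ⊢
  have := pvFindFrom_ge s.toList pat.toList start h
  omega

def last2_alt (str : String) : Int :=
  if PySem.Str.len str < 2 then 0
  else
    let pat := PySem.Str.slice str (some (-2)) none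
    last2FindLoop str pat 0 0 - 1

-- ===== PRECONDITION & SPEC =====
def Spec_last2 (str : String) (out : Int) : Prop := out = last2_alt str
instance (str : String) (out : Int) : Decidable (Spec_last2 str out) := by unfold Spec_last2; infer_instance

-- ===== CLAIM (what is proved, stated in full; the proofs are below) =====
def Claim_equal_last2 : Prop := ∀ (str : String), Dom_last2 str → Spec_last2 str (last2 str)

-- ===== LEMMAS AND PROOFS =====

-- number of match positions j ∈ [start, s.length) with pat a prefix of s.drop j
def pvN (s pat : List Char) (start : Nat) : Nat :=
  (List.range' start (s.length - start)).countP (fun j => decide (pat <+: s.drop j))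

theorem pv_foldl_count {α : Type} (p : α → Prop) [DecidablePred p] (l : List α) (c : Int) :
    l.foldl (fun cnt i => if p i then cnt + 1 else cnt) c = c + l.countP (fun i => decide (p i)) := by
  induction l generalizing c with
  | nil => simp
  | cons x xs ih =>
    simp only [List.foldl_cons, List.countP_cons, ih]
    by_cases hp : p x
    · simp [hp]; ring
    · simp [hp]

theorem pvN_zero_of_no_match (s pat : List Char) (start : Nat)
    (h : ∀ j, start ≤ j → ¬ pat <+: s.drop j) : pvN s pat start = 0 := by
  unfold pvN
  rw [List.countP_eq_zero]
  intro j hj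
  have hmem := List.mem_range'_1.mp hj
  simp only [decide_eq_true_eq]
  exact h j hmem.1

theorem pvN_split (s pat : List Char) (start m : Nat)
    (hsm : start ≤ m) (hml : m < s.length)
    (hm : pat <+: s.drop m)
    (hno : ∀ j, start ≤ j → j < m → ¬ pat <+: s.drop j) :
    pvN s pat start = 1 + pvN s pat (m + 1) := by
  unfold pvN
  have hmid : start + (m - start) = m := by omega
  have e1 : List.range' m 1 ++ List.range' (m + 1) (s.length - (m + 1))
      = List.range' m (1 + (s.length - (m + 1))) := List.range'_append_1
  have e2 : List.range' start (m - start) ++ List.range' (start + (m - start)) (1 + (s.length - (m + 1)))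
      = List.range' start ((m - start) + (1 + (s.length - (m + 1)))) := List.range'_append_1
  rw [hmid] at e2
  have hsplit : List.range' start (s.length - start) =
      List.range' start (m - start) ++ (List.range' m 1 ++ List.range' (m + 1) (s.length - (m + 1))) := by
    rw [e1, e2]
    congr 1
    omega
  rw [hsplit]
  simp only [List.countP_append]
  have h1 : (List.range' start (m - start)).countP (fun j => decide (pat <+: s.drop j)) = 0 := by
    rw [List.countP_eq_zero]
    intro j hj
    have := List.mem_range'_1.mp hj
    simp only [decide_eq_true_eq]
    exact hno j this.1 (by omega)
  have h2 : (List.range' m 1).countP (fun j => decide (pat <+: s.drop j)) = 1 := by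
    simp [List.range'_one, hm]
  omega

-- B's loop counts exactly the match positions from `start` on
theorem pv_loop_eq (s pat : String) (hpat : pat.toList ≠ []) (start : Nat) (cnt : Int) :
    last2FindLoop s pat start cnt = cnt + pvN s.toList pat.toList start := by
  have main : ∀ (fb start : Nat) (cnt : Int), s.toList.length + 1 - start ≤ fb →
      last2FindLoop s pat start cnt = cnt + pvN s.toList pat.toList start := by
    intro fb
    induction fb with
    | zero =>
      intro start cnt hfb
      have hgt : s.toList.length < start := by omega
      have hidx : PySem.Str.findFrom s pat (start : Int) none = -1 := by
        by_contra hc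
        have := pvFindFrom_ge s.toList pat.toList start (by simpa [PySem.Str.findFrom_eq] using hc)
        omega
      rw [last2FindLoop]
      simp only [hidx, dite_true]
      have : pvN s.toList pat.toList start = 0 := by
        unfold pvN
        rw [show s.toList.length - start = 0 by omega]
        simp
      omega
    | succ fb ih =>
      intro start cnt hfb
      rw [last2FindLoop]
      by_cases hidx : PySem.Str.findFrom s pat (start : Int) none = -1
      · simp only [hidx, dite_true]
        have hN : pvN s.toList pat.toList start = 0 := by
          apply pvN_zero_of_no_match
          intro j hj hpre
          by_cases hk : start ≤ s.toList.length
          · have hni := (PySem.Chars.findFrom_natCast_eq_neg_one_iff s.toList pat.toList start hk).mp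
              (by simpa [PySem.Str.findFrom_eq] using hidx)
            apply hni
            have hdd : pat.toList <+: (s.toList.drop start).drop (j - start) := by
              rw [List.drop_drop]
              rw [show start + (j - start) = j by omega]
              exact hpre
            exact hdd.isInfix.trans (List.drop_suffix _ _).isInfix
          · have hj' : s.toList.length ≤ j := by omega
            rw [List.drop_eq_nil_of_le hj'] at hpre
            exact hpat (List.prefix_nil.mp hpre ▸ rfl)
        omega
      · simp only [hidx, dite_false]
        have hidx' : PySem.Chars.findFrom s.toList pat.toList (start : Int) ≠ -1 := by
          simpa [PySem.Str.findFrom_eq] using hidx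
        have hk : start ≤ s.toList.length := (pvFindFrom_ge _ _ _ hidx').1
        have hspec := PySem.Chars.findFrom_natCast_spec s.toList pat.toList start hk hidx'
        have hIe : PySem.Str.findFrom s pat (start : Int) none
            = PySem.Chars.findFrom s.toList pat.toList (start : Int) := by
          simp [PySem.Str.findFrom_eq]
        rw [hIe]
        set I := PySem.Chars.findFrom s.toList pat.toList (start : Int) with hI
        have hge : (start : Int) ≤ I := hspec.1
        have hpre : pat.toList <+: s.toList.drop I.toNat := hspec.2.1
        have hml : I.toNat < s.toList.length := by
          by_contra hcon
          rw [List.drop_eq_nil_of_le (by omega)] at hpre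
          exact hpat (List.prefix_nil.mp hpre ▸ rfl)
        have hsm : start ≤ I.toNat := by omega
        rw [ih (I.toNat + 1) (cnt + 1) (by omega)]
        rw [pvN_split s.toList pat.toList start I.toNat hsm hml hpre hspec.2.2]
        push_cast
        ring
  exact main (s.toList.length + 1 - start) start cnt (le_refl _)

-- A's window test equals the prefix condition when pat has length 2
theorem pv_window_iff (s pat : List Char) (hp : pat.length = 2) (k : Nat) :
    ((s.drop k).take 2 = pat ↔ pat <+: s.drop k) := by
  constructor
  · intro h
    rw [← h]
    exact List.take_prefix _ _
  · intro h
    have := List.prefix_iff_eq_take.mp h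
    rw [this, hp]

-- ===== VERDICT (by name: the statement is the Claim_ definition above) =====
theorem last2_spec : Claim_equal_last2 := by
  intro str _
  unfold Spec_last2 last2 last2_alt
  by_cases hlen : PySem.Str.len str < 2
  · rw [if_pos hlen, if_pos hlen]
  · rw [if_neg hlen, if_neg hlen]
    have hLT : str.toList.length = str.length := by simp
    have hlen2 : 2 ≤ str.toList.length := by
      simp [PySem.Str.len] at hlen
      omega
    show (PySem.List.pyRange 0 (PySem.Str.len str) 1).foldl
        (fun cnt i =>
          if PySem.Str.slice str (some i) (some (i + 2)) = PySem.Str.slice str (some (-2)) none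
          then cnt + 1 else cnt) 0 - 1
      = last2FindLoop str (PySem.Str.slice str (some (-2)) none) 0 0 - 1
    set pat := PySem.Str.slice str (some (-2)) none with hpatdef
    have hpatl : pat.toList = str.toList.drop (str.toList.length - 2) := by
      rw [hpatdef, PySem.Str.toList_slice, PySem.Chars.slice_eq_listSlice]
      rw [PySem.List.slice_from_neg_ofNat str.toList 2 (by norm_num)]
    have hplen : pat.toList.length = 2 := by
      rw [hpatl]; simp [hLT]; omega
    have hpne : pat.toList ≠ [] := by
      intro h; rw [h] at hplen; simp at hplen
    -- B side
    rw [pv_loop_eq str pat hpne 0 0]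
    -- A side: rewrite the fold into a countP over positions
    rw [PySem.List.pyRange_one, List.foldl_map,
        pv_foldl_count (fun k : Nat =>
          PySem.Str.slice str (some ((0:Int) + (k:Int))) (some (((0:Int) + (k:Int)) + 2)) = pat)]
    have hcount :
        (List.range ((PySem.Str.len str - 0).toNat)).countP
          (fun k : Nat => decide (PySem.Str.slice str (some ((0:Int)+(k:Int))) (some (((0:Int)+(k:Int))+2)) = pat))
          = pvN str.toList pat.toList 0 := by
      unfold pvN
      rw [Nat.sub_zero, ← List.range_eq_range']
      have hlenN : (PySem.Str.len str - 0).toNat = str.toList.length := by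
        simp [PySem.Str.len]
      rw [hlenN]
      apply List.countP_congr
      intro k _
      simp only [decide_eq_true_eq]
      have h0 : ((0:Int) + (k:Int)) = ((k : Nat) : Int) := by norm_num
      have h2 : ((k : Int) + 2) = (((k : Nat) : Int) + ((2 : Nat) : Int)) := by norm_num
      rw [h0, h2, ← String.toList_inj, PySem.Str.toList_slice, PySem.Chars.slice_eq_listSlice]
      rw [PySem.List.slice_natCast_add]
      rw [hpatl]
      exact pv_window_iff str.toList (str.toList.drop (str.toList.length - 2))
        (by simp; omega) k
    rw [hcount]
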